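-- pv_equiv track=rewrite | github.com/jamOne-/adventofcode2018 | 22/22b.py | fastest_path_time
-- ===== SOURCE A (Python) =====
-- import heapq
--
-- def get_neighbours(cave, position, equipment):
--   x, y = position
--   max_x, max_y = len(cave[0]), len(cave)
--
--   for x, y in [(x - 1, y), (x + 1, y), (x, y - 1), (x, y + 1)]:
--     if max_x > x >= 0 and max_y > y >= 0 and cave[y][x] != equipment:
--       yield x, y
--
-- def fastest_path_time(cave, target):
--   initial_state = ((0, 0), 1)
--   state_time_dict = dict()
--   state_time_dict[initial_state] = 0
--   queue = [(0, *initial_state)]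
--
--   while queue:
--     time, position, equipment = heapq.heappop(queue)
--
--     if state_time_dict[position, equipment] < time:
--       continue
--
--     if (position, equipment) == (target, 1):
--       return time
--
--     for new_position in get_neighbours(cave, position, equipment):
--       new_time = time + 1
--       state = new_position, equipment
--
--       if state not in state_time_dict or state_time_dict[state] > new_time:
--         state_time_dict[state] = new_time
--         heapq.heappush(queue, (new_time, *state))
--
--     for new_equipment in [0, 1, 2]:
--       new_time = time + 7
--       state = position, new_equipment
--
--       if cave[position[1]][position[0]] != new_equipment and (state not in state_time_dict or state_time_dict[state] > new_time):
--         state_time_dict[state] = new_time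
--         heapq.heappush(queue, (new_time, *state))
-- ===== SOURCE B (Python) =====
-- def fastest_path_time(cave, target):
--   height, width = len(cave), len(cave[0])
--   dist = {((0, 0), 1): 0}
--   visited = set()
--
--   while True:
--     best = None
--     for state, d in dist.items():
--       if state not in visited and (best is None or (d, state) < best):
--         best = (d, state)
--
--     if best is None:
--       return None
--
--     d, (position, equipment) = best
--     if (position, equipment) == (target, 1):
--       return d
--
--     visited.add((position, equipment))
--     x, y = position
--     moves = [((nx, ny), equipment)
--              for nx, ny in ((x - 1, y), (x + 1, y), (x, y - 1), (x, y + 1))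
--              if 0 <= nx < width and 0 <= ny < height and cave[ny][nx] != equipment]
--     switches = [(position, e) for e in (0, 1, 2) if cave[y][x] != e]
--
--     for state, nd in [(s, d + 1) for s in moves] + [(s, d + 7) for s in switches]:
--       if state not in dist or nd < dist[state]:
--         dist[state] = nd
-- ===== Notes on version B (the rewrite author's own statement) =====
-- stated objective: alternative
-- what changed: Replaced the binary heap + lazy-deletion Dijkstra with a heap-free selection Dijkstra: each round does a linear min-scan of the tentative-distance dict against a visited set, so there is no priority queue, no stale/duplicate entries and no skip branch; relaxation builds the candidate list (moves and equipment switches) first and then updates the dict in one pass.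
-- outside the precondition, e.g. on fastest_path_time([], (0, 0)): A returns 0, B raises IndexError; on fastest_path_time([[]], (0, 0)): A returns 0, B returns 0; on fastest_path_time([[0, 0], [0]], (0, 0)): A returns 0, B returns 0
import Mathlib
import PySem

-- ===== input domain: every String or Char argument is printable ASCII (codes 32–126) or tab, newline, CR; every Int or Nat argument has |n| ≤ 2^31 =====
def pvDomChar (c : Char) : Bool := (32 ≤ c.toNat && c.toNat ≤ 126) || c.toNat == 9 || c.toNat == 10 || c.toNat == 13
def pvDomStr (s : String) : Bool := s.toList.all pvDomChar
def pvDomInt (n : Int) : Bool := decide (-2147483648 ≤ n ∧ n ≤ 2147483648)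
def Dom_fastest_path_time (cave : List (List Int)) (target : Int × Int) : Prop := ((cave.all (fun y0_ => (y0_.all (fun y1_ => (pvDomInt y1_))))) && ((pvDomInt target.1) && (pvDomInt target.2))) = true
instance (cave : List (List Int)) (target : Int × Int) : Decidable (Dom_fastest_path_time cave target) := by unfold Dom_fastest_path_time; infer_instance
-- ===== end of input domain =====

-- B replaces A's binary heap + lazy-deletion Dijkstra by a heap-free selection Dijkstra
-- (linear min-scan of the tentative-distance dict against a visited set); same return value.

-- A state is (position, equipment); an entry pairs a time/distance with a state.
abbrev PvState : Type := (Int × Int) × Int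
abbrev PvEntry : Type := Int × PvState

-- Python's `<` on tuples (time, (x, y), equipment): lexicographic (shared tuple-order helper).
def pvEntryLt (a b : PvEntry) : Bool :=
  if a.1 ≠ b.1 then decide (a.1 < b.1)
  else if a.2.1.1 ≠ b.2.1.1 then decide (a.2.1.1 < b.2.1.1)
  else if a.2.1.2 ≠ b.2.1.2 then decide (a.2.1.2 < b.2.1.2)
  else decide (a.2.2 < b.2.2)

-- cave[y][x]; every evaluated access is in range under Pre_ (guards precede each access).
def pvCaveAt (cave : List (List Int)) (x y : Int) : Int :=
  PySem.List.pyGetD (PySem.List.pyGetD cave y []) x 0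

-- ===== PORT A =====
-- heapq.heappush ported as sorted-list insertion: the queue holds the heap's multiset in
-- ascending Python-tuple order, so heappop (= take the smallest entry) is taking the head.
def pvHeapPush (q : List PvEntry) (e : PvEntry) : List PvEntry :=
  match q with
  | [] => [e]
  | x :: xs => if pvEntryLt e x then e :: x :: xs else x :: pvHeapPush xs e

def get_neighbours (cave : List (List Int)) (position : Int × Int) (equipment : Int) : List (Int × Int) :=
  let max_x : Int := (PySem.List.pyGetD cave 0 []).length
  let max_y : Int := cave.length
  [(position.1 - 1, position.2), (position.1 + 1, position.2),
   (position.1, position.2 - 1), (position.1, position.2 + 1)].filter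
    (fun p => decide (p.1 < max_x) && decide (0 ≤ p.1) && decide (p.2 < max_y) && decide (0 ≤ p.2)
      && (pvCaveAt cave p.1 p.2 != equipment))

def pvLoopA (cave : List (List Int)) (target : Int × Int) :
    Nat → PySem.Dict PvState Int → List PvEntry → Option Int
  | 0, _, _ => none
  | n + 1, state_time_dict, queue =>
    match queue with
    | [] => none
    | (time, position, equipment) :: rest =>
      -- KeyError impossible here: every queued state is a key of the dict (proved invariant)
      if state_time_dict.getD (position, equipment) 0 < time then
        pvLoopA cave target n state_time_dict rest
      else if (position, equipment) = (target, 1) then some time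
      else
        let acc1 := (get_neighbours cave position equipment).foldl
          (fun acc new_position =>
            let new_time := time + 1
            let state : PvState := (new_position, equipment)
            if (match acc.1.get? state with | none => true | some v => decide (v > new_time)) then
              (acc.1.insert state new_time, pvHeapPush acc.2 (new_time, state))
            else acc) (state_time_dict, rest)
        let acc2 := ([0, 1, 2] : List Int).foldl
          (fun acc new_equipment =>
            let new_time := time + 7
            let state : PvState := (position, new_equipment)
            if (pvCaveAt cave position.1 position.2 != new_equipment)
                && (match acc.1.get? state with | none => true | some v => decide (v > new_time)) then
              (acc.1.insert state new_time, pvHeapPush acc.2 (new_time, state))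
            else acc) acc1
        pvLoopA cave target n acc2.1 acc2.2

def fastest_path_time (cave : List (List Int)) (target : Int × Int) : Option Int :=
  let W := (PySem.List.pyGetD cave 0 []).length
  let H := cave.length
  -- fuel guard only: proved sufficient under Pre_ (the loop always returns before it runs out)
  pvLoopA cave target (3 * W * H * (21 * W * H + 1) + 2)
    (PySem.Dict.empty.insert ((0, 0), 1) 0) [(0, ((0, 0), 1))]

-- ===== PORT B =====
def pvScanBest (dist : PySem.Dict PvState Int) (visited : PySem.Set PvState) : Option PvEntry :=
  dist.items.foldl
    (fun best sd =>
      if visited.contains sd.1 then best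
      else
        match best with
        | none => some (sd.2, sd.1)
        | some b => if pvEntryLt (sd.2, sd.1) b then some (sd.2, sd.1) else best)
    none

def pvLoopB (cave : List (List Int)) (target : Int × Int) (width height : Int) :
    Nat → PySem.Dict PvState Int → PySem.Set PvState → Option Int
  | 0, _, _ => none
  | n + 1, dist, visited =>
    match pvScanBest dist visited with
    | none => none
    | some (d, state) =>
      if state = (target, 1) then some d
      else
        let visited' := PySem.Set.add visited state
        let x := state.1.1
        let y := state.1.2
        let moves : List PvState :=
          (([(x - 1, y), (x + 1, y), (x, y - 1), (x, y + 1)] : List (Int × Int)).filter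
            (fun p => decide (0 ≤ p.1) && decide (p.1 < width) && decide (0 ≤ p.2)
              && decide (p.2 < height) && (pvCaveAt cave p.1 p.2 != state.2))).map
            (fun p => (p, state.2))
        let switches : List PvState :=
          (([0, 1, 2] : List Int).filter (fun e => pvCaveAt cave x y != e)).map
            (fun e => (state.1, e))
        let dist' := (moves.map (fun s => (s, d + 1)) ++ switches.map (fun s => (s, d + 7))).foldl
          (fun dd c =>
            if (match dd.get? c.1 with | none => true | some v => decide (c.2 < v)) then
              dd.insert c.1 c.2
            else dd) dist
        pvLoopB cave target width height n dist' visited'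

def fastest_path_time_alt (cave : List (List Int)) (target : Int × Int) : Option Int :=
  let height := cave.length
  let width := (PySem.List.pyGetD cave 0 []).length
  pvLoopB cave target (width : Int) (height : Int) (3 * width * height + 2)
    (PySem.Dict.empty.insert ((0, 0), 1) 0) PySem.Set.empty

-- ===== PRECONDITION & SPEC =====
-- Pre_ excludes the empty cave, an empty first row, and caves having a row shorter than the
-- first row: on those, indexing cave[y][x] can raise IndexError in either program (A returns
-- only in corner cases where the goal check or a blocked cell happens to precede the bad access).
def Pre_fastest_path_time (cave : List (List Int)) (target : Int × Int) : Prop :=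
  cave ≠ [] ∧ (PySem.List.pyGetD cave 0 []) ≠ [] ∧
    ∀ row ∈ cave, (PySem.List.pyGetD cave 0 []).length ≤ row.length
instance (cave : List (List Int)) (target : Int × Int) : Decidable (Pre_fastest_path_time cave target) := by
  unfold Pre_fastest_path_time; infer_instance

def pvWitness_fastest_path_time : List (List Int) × (Int × Int) := ([[0, 1], [2, 0]], (1, 1))

def Spec_fastest_path_time (cave : List (List Int)) (target : Int × Int) (out : Option Int) : Prop := out = fastest_path_time_alt cave target
instance (cave : List (List Int)) (target : Int × Int) (out : Option Int) : Decidable (Spec_fastest_path_time cave target out) := by unfold Spec_fastest_path_time; infer_instance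

-- ===== CLAIM (what is proved, stated in full; the proofs are below) =====
def Claim_equal_fastest_path_time : Prop := ∀ (cave : List (List Int)) (target : Int × Int), Dom_fastest_path_time cave target → Pre_fastest_path_time cave target → Spec_fastest_path_time cave target (fastest_path_time cave target)

-- ===== LEMMAS AND PROOFS =====
-- the strict tuple order as a Prop
def pvLtP (a b : PvEntry) : Prop := pvEntryLt a b = true

lemma pvEntryLt_irrefl (a : PvEntry) : pvEntryLt a a = false := by
  simp [pvEntryLt]

lemma pvEntryLt_total (a b : PvEntry) (h : a ≠ b) :
    pvEntryLt a b = true ∨ pvEntryLt b a = true := by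
  obtain ⟨t, ⟨x, y⟩, e⟩ := a
  obtain ⟨t', ⟨x', y'⟩, e'⟩ := b
  simp only [pvEntryLt]
  simp only [ne_eq, Prod.mk.injEq] at h
  split_ifs <;> simp_all <;> omega

lemma pvEntryLt_asymm (a b : PvEntry) (h : pvEntryLt a b = true) : pvEntryLt b a = false := by
  obtain ⟨t, ⟨x, y⟩, e⟩ := a
  obtain ⟨t', ⟨x', y'⟩, e'⟩ := b
  simp only [pvEntryLt] at *
  split_ifs at * <;> simp_all <;> omega

lemma pvEntryLt_fst_le (a b : PvEntry) (h : pvEntryLt a b = true) : a.1 ≤ b.1 := by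
  obtain ⟨t, ⟨x, y⟩, e⟩ := a
  obtain ⟨t', ⟨x', y'⟩, e'⟩ := b
  simp only [pvEntryLt] at h
  split_ifs at h <;> simp_all <;> omega

lemma pvEntryLt_trans (a b c : PvEntry) (h1 : pvEntryLt a b = true)
    (h2 : pvEntryLt b c = true) : pvEntryLt a c = true := by
  obtain ⟨t1, ⟨x1, y1⟩, e1⟩ := a
  obtain ⟨t2, ⟨x2, y2⟩, e2⟩ := b
  obtain ⟨t3, ⟨x3, y3⟩, e3⟩ := c
  simp only [pvEntryLt] at *
  split_ifs at * <;> simp_all <;> omega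

lemma mem_pvHeapPush (q : List PvEntry) (e x : PvEntry) :
    x ∈ pvHeapPush q e ↔ x ∈ q ∨ x = e := by
  induction q with
  | nil => simp [pvHeapPush]
  | cons a q ih =>
    simp only [pvHeapPush]
    split <;> simp [ih] <;> tauto

lemma length_pvHeapPush (q : List PvEntry) (e : PvEntry) :
    (pvHeapPush q e).length = q.length + 1 := by
  induction q with
  | nil => rfl
  | cons a q ih => simp only [pvHeapPush]; split <;> simp [ih]

lemma pairwise_pvHeapPush (q : List PvEntry) (e : PvEntry)
    (h : q.Pairwise pvLtP) (hne : e ∉ q) :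
    (pvHeapPush q e).Pairwise pvLtP := by
  induction q with
  | nil => simp [pvHeapPush, pvLtP]
  | cons a q ih =>
    simp only [pvHeapPush]
    rcases List.pairwise_cons.1 h with ⟨ha, hq⟩
    simp only [List.mem_cons, not_or] at hne
    split
    · rename_i hlt
      refine List.pairwise_cons.2 ⟨?_, h⟩
      intro b hb
      rcases List.mem_cons.1 hb with rfl | hb
      · exact hlt
      · exact pvEntryLt_trans e a b hlt (ha b hb)
    · rename_i hnlt
      have hae : pvLtP a e := by
        rcases pvEntryLt_total a e (fun hh => hne.1 hh.symm) with h1 | h1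
        · exact h1
        · exact absurd h1 hnlt
      refine List.pairwise_cons.2 ⟨?_, ih hq hne.2⟩
      intro b hb
      rcases (mem_pvHeapPush q e b).1 hb with hb | rfl
      · exact ha b hb
      · exact hae
-- the step function of B's min-scan
def pvScanStep (visited : PySem.Set PvState) :
    Option PvEntry → PvState × Int → Option PvEntry := fun best sd =>
  if visited.contains sd.1 then best
  else
    match best with
    | none => some (sd.2, sd.1)
    | some b => if pvEntryLt (sd.2, sd.1) b then some (sd.2, sd.1) else best

lemma pvScanBest_eq_foldl (dist : PySem.Dict PvState Int) (visited : PySem.Set PvState) :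
    pvScanBest dist visited = dist.items.foldl (pvScanStep visited) none := rfl

lemma pvScan_stay (L : List (PvState × Int)) (visited : PySem.Set PvState) (m : PvEntry)
    (h : ∀ p ∈ L, visited.contains p.1 = false → pvEntryLt (p.2, p.1) m = false) :
    L.foldl (pvScanStep visited) (some m) = some m := by
  induction L with
  | nil => rfl
  | cons p L ih =>
    have hstep : pvScanStep visited (some m) p = some m := by
      by_cases hc : p.1 ∈ visited
      · simp [pvScanStep, hc]
      · have hf := h p (by simp) (by simpa using hc)
        simp [pvScanStep, hc, hf]
    simp only [List.foldl_cons, hstep]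
    exact ih (fun p hp hc => h p (by simp [hp]) hc)

lemma pvScan_from_some (L : List (PvState × Int)) (visited : PySem.Set PvState) (m : PvEntry) :
    L.foldl (pvScanStep visited) (some m) = some m ∨
      ∃ p ∈ L, visited.contains p.1 = false ∧
        L.foldl (pvScanStep visited) (some m) = some (p.2, p.1) := by
  induction L generalizing m with
  | nil => left; rfl
  | cons p L ih =>
    simp only [List.foldl_cons]
    by_cases hc : p.1 ∈ visited
    · rcases ih m with h | ⟨p', hp', hc', h⟩
      · left; simpa [pvScanStep, hc] using h
      · right; exact ⟨p', by simp [hp'], hc', by simpa [pvScanStep, hc] using h⟩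
    · by_cases hlt : pvEntryLt (p.2, p.1) m = true
      · rcases ih (p.2, p.1) with h | ⟨p', hp', hc', h⟩
        · right; exact ⟨p, by simp, by simpa using hc, by simpa [pvScanStep, hc, hlt] using h⟩
        · right; exact ⟨p', by simp [hp'], hc', by simpa [pvScanStep, hc, hlt] using h⟩
      · rcases ih m with h | ⟨p', hp', hc', h⟩
        · left; simpa [pvScanStep, hc, hlt] using h
        · right; exact ⟨p', by simp [hp'], hc', by simpa [pvScanStep, hc, hlt] using h⟩

lemma pvScan_from_none (L : List (PvState × Int)) (visited : PySem.Set PvState) :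
    L.foldl (pvScanStep visited) none = none ∨
      ∃ p ∈ L, visited.contains p.1 = false ∧
        L.foldl (pvScanStep visited) none = some (p.2, p.1) := by
  induction L with
  | nil => left; rfl
  | cons p L ih =>
    simp only [List.foldl_cons]
    by_cases hc : p.1 ∈ visited
    · rcases ih with h | ⟨p', hp', hc', h⟩
      · left; simpa [pvScanStep, hc] using h
      · right; exact ⟨p', by simp [hp'], hc', by simpa [pvScanStep, hc] using h⟩
    · rcases pvScan_from_some L visited (p.2, p.1) with h | ⟨p', hp', hc', h⟩
      · right; exact ⟨p, by simp, by simpa using hc, by simpa [pvScanStep, hc] using h⟩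
      · right; exact ⟨p', by simp [hp'], hc', by simpa [pvScanStep, hc] using h⟩

lemma pvScanBest_eq_none (dist : PySem.Dict PvState Int) (visited : PySem.Set PvState)
    (h : ∀ p ∈ dist.items, visited.contains p.1 = true) :
    pvScanBest dist visited = none := by
  rw [pvScanBest_eq_foldl]
  rcases pvScan_from_none dist.items visited with h' | ⟨p, hp, hc, _⟩
  · exact h'
  · have hT := h p hp
    simp only [hT] at hc
    cases hc

lemma pvScanBest_eq_some (dist : PySem.Dict PvState Int) (visited : PySem.Set PvState)
    (s : PvState) (v : Int) (hnd : dist.keys.Nodup) (hmem : (s, v) ∈ dist.items)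
    (hopen : visited.contains s = false)
    (hmin : ∀ p ∈ dist.items, visited.contains p.1 = false → p.1 ≠ s →
      pvEntryLt (v, s) (p.2, p.1) = true) :
    pvScanBest dist visited = some (v, s) := by
  rw [pvScanBest_eq_foldl]
  obtain ⟨L1, L2, hsplit⟩ := List.append_of_mem hmem
  have hkeys : dist.keys = L1.map Prod.fst ++ s :: L2.map Prod.fst := by
    show dist.items.map Prod.fst = _
    simp [hsplit]
  have hndk := hkeys ▸ hnd
  have hs_notin_L1 : ∀ p ∈ L1, p.1 ≠ s := by
    intro p hp heq
    have h1 : s ∈ L1.map Prod.fst := by rw [← heq]; exact List.mem_map_of_mem hp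
    exact (List.nodup_append.1 hndk).2.2 _ h1 s (by simp) rfl
  have hs_notin_L2 : ∀ p ∈ L2, p.1 ≠ s := by
    intro p hp heq
    have h2 := (List.nodup_append.1 hndk).2.1
    rw [List.nodup_cons] at h2
    refine h2.1 ?_
    rw [← heq]; exact List.mem_map_of_mem hp
  have hstay : L2.foldl (pvScanStep visited) (some (v, s)) = some (v, s) := by
    apply pvScan_stay
    intro p hp hc
    exact pvEntryLt_asymm _ _ (hmin p (by simp [hsplit, hp]) hc (hs_notin_L2 p hp))
  have hopen' : s ∉ visited := by simpa using hopen
  rw [hsplit, List.foldl_append, List.foldl_cons]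
  rcases pvScan_from_none L1 visited with h | ⟨p, hp, hc, h⟩
  · rw [h]
    have : pvScanStep visited none (s, v) = some (v, s) := by simp [pvScanStep, hopen']
    rw [this, hstay]
  · rw [h]
    have hlt : pvEntryLt (v, s) (p.2, p.1) = true :=
      hmin p (by simp [hsplit, hp]) hc (hs_notin_L1 p hp)
    have : pvScanStep visited (some (p.2, p.1)) (s, v) = some (v, s) := by
      simp [pvScanStep, hopen', hlt]
    rw [this, hstay]
-- the shared relaxation step, on (dict, queue) pairs
def pvImprove (dd : PySem.Dict PvState Int) (c : PvState × Int) : Bool :=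
  match dd.get? c.1 with
  | none => true
  | some v => decide (c.2 < v)

def pvStepPair (dq : PySem.Dict PvState Int × List PvEntry) (c : PvState × Int) :
    PySem.Dict PvState Int × List PvEntry :=
  if pvImprove dq.1 c then (dq.1.insert c.1 c.2, pvHeapPush dq.2 (c.2, c.1)) else dq

def pvRelax (cs : List (PvState × Int)) (dq : PySem.Dict PvState Int × List PvEntry) :
    PySem.Dict PvState Int × List PvEntry :=
  cs.foldl pvStepPair dq

lemma pvRelax_fst (cs : List (PvState × Int)) (dq : PySem.Dict PvState Int × List PvEntry) :
    (pvRelax cs dq).1 =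
      cs.foldl (fun dd c => if pvImprove dd c then dd.insert c.1 c.2 else dd) dq.1 := by
  induction cs generalizing dq with
  | nil => rfl
  | cons c cs ih =>
    simp only [pvRelax, List.foldl_cons] at *
    rw [ih]
    by_cases h : pvImprove dq.1 c <;> simp [pvStepPair, h]

-- A's neighbour-relaxation loop is pvRelax over the paired candidate list
lemma pvFoldA_moves (l : List (Int × Int)) (e t : Int)
    (dq : PySem.Dict PvState Int × List PvEntry) :
    l.foldl
      (fun acc new_position =>
        if (match acc.1.get? (new_position, e) with
            | none => true
            | some v => decide (v > t + 1)) = true then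
          (acc.1.insert (new_position, e) (t + 1), pvHeapPush acc.2 (t + 1, new_position, e))
        else acc) dq
    = pvRelax (l.map (fun np => ((np, e), t + 1))) dq := by
  rw [pvRelax, List.foldl_map]
  have hfun : (fun (acc : PySem.Dict PvState Int × List PvEntry) (np : Int × Int) =>
      pvStepPair acc ((np, e), t + 1)) =
      (fun acc new_position =>
        if (match acc.1.get? (new_position, e) with
            | none => true
            | some v => decide (v > t + 1)) = true then
          (acc.1.insert (new_position, e) (t + 1), pvHeapPush acc.2 (t + 1, new_position, e))
        else acc) := by
    funext acc np
    simp only [pvStepPair, pvImprove, gt_iff_lt]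
  rw [← hfun]

-- A's equipment-relaxation loop is pvRelax over the filtered, paired candidate list
lemma pvFoldA_switch (l : List Int) (cave : List (List Int)) (pos : Int × Int) (t : Int)
    (dq : PySem.Dict PvState Int × List PvEntry) :
    l.foldl
      (fun acc new_equipment =>
        if (pvCaveAt cave pos.1 pos.2 != new_equipment &&
            match acc.1.get? (pos, new_equipment) with
            | none => true
            | some v => decide (v > t + 7)) = true then
          (acc.1.insert (pos, new_equipment) (t + 7), pvHeapPush acc.2 (t + 7, pos, new_equipment))
        else acc) dq
    = pvRelax ((l.filter (fun ne => pvCaveAt cave pos.1 pos.2 != ne)).map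
        (fun ne => ((pos, ne), t + 7))) dq := by
  induction l generalizing dq with
  | nil => rfl
  | cons a l ih =>
    by_cases hp : (pvCaveAt cave pos.1 pos.2 != a) = true
    · simp only [List.foldl_cons, List.filter_cons, hp, if_pos, List.map_cons, pvRelax,
        Bool.true_and]
      rw [← pvRelax, ← ih]
      have hstep : ∀ dq' : PySem.Dict PvState Int × List PvEntry,
          pvStepPair dq' ((pos, a), t + 7) =
            if (match dq'.1.get? (pos, a) with
                | none => true
                | some v => decide (v > t + 7)) = true then
              (dq'.1.insert (pos, a) (t + 7), pvHeapPush dq'.2 (t + 7, pos, a))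
            else dq' := by
        intro dq'
        simp only [pvStepPair, pvImprove, gt_iff_lt]
      rw [hstep]
    · have hp' : (pvCaveAt cave pos.1 pos.2 != a) = false := by simpa using hp
      simp only [List.foldl_cons, List.filter_cons, hp', Bool.false_and, Bool.false_eq_true,
        if_false]
      exact ih dq

lemma pvRelax_append (a b : List (PvState × Int)) (dq : PySem.Dict PvState Int × List PvEntry) :
    pvRelax (a ++ b) dq = pvRelax b (pvRelax a dq) := by
  simp [pvRelax, List.foldl_append]

-- B's relaxation fold is the dict component of pvRelax
lemma pvFoldB_eq (cs : List (PvState × Int)) (d : PySem.Dict PvState Int) (q0 : List PvEntry) :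
    cs.foldl
      (fun dd c =>
        if (match dd.get? c.1 with
            | none => true
            | some v => decide (c.2 < v)) = true then
          dd.insert c.1 c.2
        else dd) d
    = (pvRelax cs (d, q0)).1 := by
  rw [pvRelax_fst]
  rfl

-- the two neighbour filters test the same conditions in a different order
lemma pvPred_eq (Wi Hi : Int) (cv : List (List Int)) (e : Int) (p : Int × Int) :
    (decide (0 ≤ p.1) && decide (p.1 < Wi) && decide (0 ≤ p.2) && decide (p.2 < Hi) &&
      (pvCaveAt cv p.1 p.2 != e))
    = (decide (p.1 < Wi) && decide (0 ≤ p.1) && decide (p.2 < Hi) && decide (0 ≤ p.2) &&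
      (pvCaveAt cv p.1 p.2 != e)) := by
  cases h1 : decide (0 ≤ p.1) <;> cases h2 : decide (p.1 < Wi) <;>
    cases h3 : decide (0 ≤ p.2) <;> cases h4 : decide (p.2 < Hi) <;> simp

-- valid states: inside the W×H grid with equipment 0, 1 or 2
def pvValid (W H : Nat) (s : PvState) : Prop :=
  0 ≤ s.1.1 ∧ s.1.1 < (W : Int) ∧ 0 ≤ s.1.2 ∧ s.1.2 < (H : Int) ∧ 0 ≤ s.2 ∧ s.2 < 3

lemma pvCard (W H : Nat) (l : List PvState) (hnd : l.Nodup)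
    (hv : ∀ s ∈ l, pvValid W H s) : l.length ≤ 3 * W * H := by
  classical
  have hsub : l.toFinset ⊆
      (Finset.Icc (0 : Int) ((W : Int) - 1) ×ˢ Finset.Icc (0 : Int) ((H : Int) - 1)) ×ˢ
        Finset.Icc (0 : Int) 2 := by
    intro s hs
    obtain ⟨⟨x, y⟩, e⟩ := s
    have hvv := hv _ (List.mem_toFinset.1 hs)
    simp only [pvValid] at hvv
    simp only [Finset.mem_product, Finset.mem_Icc]
    omega
  have hcard := Finset.card_le_card hsub
  rw [List.toFinset_card_of_nodup hnd] at hcard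
  have hc : ((Finset.Icc (0 : Int) ((W : Int) - 1) ×ˢ Finset.Icc (0 : Int) ((H : Int) - 1)) ×ˢ
      Finset.Icc (0 : Int) 2).card = W * H * 3 := by
    simp only [Finset.card_product, Int.card_Icc]
    have h1 : ((W : Int) - 1 + 1 - 0).toNat = W := by omega
    have h2 : ((H : Int) - 1 + 1 - 0).toNat = H := by omega
    have h3 : ((2 : Int) + 1 - 0).toNat = 3 := by omega
    rw [h1, h2, h3]
  rw [hc] at hcard
  have h4 : W * H * 3 = 3 * W * H := by ring
  rw [h4] at hcard
  exact hcard

lemma pvSum_le_strict {α : Type} (l : List α) (f g : α → Nat)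
    (h : ∀ x ∈ l, f x ≤ g x) (x0 : α) (hx0 : x0 ∈ l) (hs : f x0 + 1 ≤ g x0) :
    (l.map f).sum + 1 ≤ (l.map g).sum := by
  induction l with
  | nil => cases hx0
  | cons a l ih =>
    simp only [List.map_cons, List.sum_cons]
    rcases List.mem_cons.1 hx0 with rfl | hx0'
    · have hle : (l.map f).sum ≤ (l.map g).sum :=
        List.sum_le_sum (fun x hx => h x (by simp [hx]))
      omega
    · have := ih (fun x hx => h x (by simp [hx])) hx0'
      have := h a (by simp)
      omega

-- the termination potential
def pvPhi (W H : Nat) (dist : PySem.Dict PvState Int) (q : List PvEntry) : Nat :=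
  q.length + (dist.items.map (fun p => p.2.toNat)).sum +
    (3 * W * H - dist.size) * (21 * W * H + 1)
-- the loop invariant tying A's (dict, queue) to B's (dist, visited) with dict = dist:
-- sorted distinct queue; every entry dominates its state's dict value, with equality exactly
-- for the unique fresh entry of each unexpanded state; expanded states dominate nothing in the
-- queue; all keys are valid in-grid states with bounded nonnegative values.
def pvInv (W H : Nat) (dist : PySem.Dict PvState Int) (visited : List PvState)
    (q : List PvEntry) : Prop :=
  dist.keys.Nodup ∧
  visited.Nodup ∧
  q.Pairwise pvLtP ∧
  (∀ e ∈ q, ∃ v, dist.get? e.2 = some v ∧ v ≤ e.1 ∧ (v = e.1 → e.2 ∉ visited)) ∧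
  (∀ s v, dist.get? s = some v → s ∉ visited → (v, s) ∈ q) ∧
  (∀ s ∈ visited, ∀ v, dist.get? s = some v → ∀ e ∈ q, v ≤ e.1) ∧
  (∀ s ∈ visited, (dist.get? s).isSome = true) ∧
  (∀ s v, dist.get? s = some v → pvValid W H s) ∧
  (∀ s v, dist.get? s = some v → 0 ≤ v ∧ v ≤ 7 * ((dist.size : Int) - 1)) ∧
  (∀ e ∈ q, 0 ≤ e.1)

lemma pvSize_eq_keys_length {κ ν : Type} [BEq κ] (d : PySem.Dict κ ν) :
    d.size = d.keys.length := by
  simp [PySem.Dict.size, PySem.Dict.keys]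

lemma pvKeysValid (W H : Nat) (d : PySem.Dict PvState Int)
    (h : ∀ s v, d.get? s = some v → pvValid W H s) :
    ∀ k ∈ d.keys, pvValid W H k := by
  intro k hk
  have hc : d.contains k = true := by
    rw [PySem.Dict.contains_eq_decide_mem_keys]
    simp [hk]
  rw [PySem.Dict.contains_eq_isSome_get?] at hc
  cases hval : d.get? k with
  | none => rw [hval] at hc; cases hc
  | some v => exact h k v hval

lemma pvPhi_push_le (W H : Nat) (dist : PySem.Dict PvState Int) (q : List PvEntry)
    (s : PvState) (v : Int) (hnd : dist.keys.Nodup) (h0 : 0 ≤ v)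
    (hnew : dist.contains s = false → dist.size < 3 * W * H ∧ v ≤ 7 * (dist.size : Int))
    (hupd : ∀ w, dist.get? s = some w → v < w) :
    pvPhi W H (dist.insert s v) (pvHeapPush q (v, s)) ≤ pvPhi W H dist q := by
  unfold pvPhi
  rw [length_pvHeapPush]
  by_cases hc : dist.contains s = true
  · -- overwrite of an existing, strictly larger value
    have hsome : (dist.get? s).isSome = true := by
      rw [← PySem.Dict.contains_eq_isSome_get?]; exact hc
    obtain ⟨w, hw⟩ := Option.isSome_iff_exists.1 hsome
    have hvw := hupd w hw
    have hitems := PySem.Dict.items_insert_of_contains dist v hc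
    have hsize := PySem.Dict.size_insert dist s v
    rw [hc, if_pos rfl] at hsize
    have hsum : ((dist.insert s v).items.map (fun p => p.2.toNat)).sum + 1 ≤
        (dist.items.map (fun p => p.2.toNat)).sum := by
      rw [hitems, List.map_map]
      refine pvSum_le_strict dist.items _ _ ?_ (s, w)
        (PySem.Dict.mem_items_of_get?_eq_some dist hw) ?_
      · intro p hp
        by_cases hps : (p.1 == s) = true
        · have hpk : p.1 = s := by simpa using hps
          have hpv : dist.get? p.1 = some p.2 := PySem.Dict.get?_of_mem_items dist hp hnd
          rw [hpk, hw] at hpv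
          have hp2 : p.2 = w := by simpa using hpv.symm
          simp only [Function.comp_apply, hps, if_true]
          omega
        · simp only [Function.comp_apply, hps]
          simp
      · simp only [Function.comp_apply, beq_self_eq_true, if_true]
        omega
    rw [hsize]
    omega
  · -- genuinely new key
    have hcf : dist.contains s = false := by simpa using hc
    obtain ⟨hlt, hbv⟩ := hnew hcf
    have hitems := PySem.Dict.items_insert_of_not_contains dist v hcf
    have hsize := PySem.Dict.size_insert dist s v
    rw [hcf] at hsize
    simp only [Bool.false_eq_true, if_false] at hsize
    rw [hitems, hsize]
    simp only [List.map_append, List.sum_append, List.map_cons, List.map_nil, List.sum_cons,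
      List.sum_nil]
    have h1 : 3 * W * H - dist.size = (3 * W * H - (dist.size + 1)) + 1 := by omega
    have h2 : (3 * W * H - dist.size) * (21 * W * H + 1) =
        (3 * W * H - (dist.size + 1)) * (21 * W * H + 1) + (21 * W * H + 1) := by
      rw [h1, Nat.add_mul, Nat.one_mul]
    have h3 : v.toNat ≤ 7 * dist.size := by omega
    have h4 : 7 * dist.size ≤ 7 * (3 * W * H) - 7 := by
      have := Nat.mul_le_mul_left 7 (by omega : dist.size ≤ 3 * W * H - 1)
      omega
    have h5 : 21 * W * H = 7 * (3 * W * H) := by ring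
    omega
lemma pvRelax_preserve (W H : Nat) (visited : List PvState) (t : Int) :
    ∀ (cs : List (PvState × Int)),
    (∀ c ∈ cs, pvValid W H c.1) →
    (∀ c ∈ cs, t + 1 ≤ c.2) →
    (∀ c ∈ cs, c.2 ≤ t + 7) →
    ∀ (dist : PySem.Dict PvState Int) (q : List PvEntry),
    pvInv W H dist visited q →
    (∀ s ∈ visited, ∀ v, dist.get? s = some v → v ≤ t) →
    0 ≤ t →
    t ≤ 7 * ((dist.size : Int) - 1) →
    pvInv W H (pvRelax cs (dist, q)).1 visited (pvRelax cs (dist, q)).2 ∧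
      (∀ s ∈ visited, ∀ v, (pvRelax cs (dist, q)).1.get? s = some v → v ≤ t) ∧
      dist.size ≤ (pvRelax cs (dist, q)).1.size ∧
      pvPhi W H (pvRelax cs (dist, q)).1 (pvRelax cs (dist, q)).2 ≤ pvPhi W H dist q := by
  intro cs
  induction cs with
  | nil =>
    intro _ _ _ dist q hinv hvist ht0 htb
    exact ⟨hinv, hvist, le_refl _, le_refl _⟩
  | cons c cs ih =>
    intro hval hlo hhi dist q hinv hvist ht0 htb
    obtain ⟨hND, hVN, hPW, hA, hB, hC, hS, hVal, hBnd, hQ0⟩ := hinv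
    have hcs_val : ∀ c' ∈ cs, pvValid W H c'.1 := fun c' hc' => hval c' (by simp [hc'])
    have hcs_lo : ∀ c' ∈ cs, t + 1 ≤ c'.2 := fun c' hc' => hlo c' (by simp [hc'])
    have hcs_hi : ∀ c' ∈ cs, c'.2 ≤ t + 7 := fun c' hc' => hhi c' (by simp [hc'])
    have hc_lo : t + 1 ≤ c.2 := hlo c (by simp)
    have hc_hi : c.2 ≤ t + 7 := hhi c (by simp)
    have hc_val : pvValid W H c.1 := hval c (by simp)
    have hcons : ∀ dq : PySem.Dict PvState Int × List PvEntry,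
        pvRelax (c :: cs) dq = pvRelax cs (pvStepPair dq c) := fun dq => rfl
    rw [hcons]
    by_cases himp : pvImprove dist c = true
    case neg =>
      have hstep : pvStepPair (dist, q) c = (dist, q) := by
        simp [pvStepPair, himp]
      rw [hstep]
      exact ih hcs_val hcs_lo hcs_hi dist q
        ⟨hND, hVN, hPW, hA, hB, hC, hS, hVal, hBnd, hQ0⟩ hvist ht0 htb
    case pos =>
      have hstep : pvStepPair (dist, q) c =
          (dist.insert c.1 c.2, pvHeapPush q (c.2, c.1)) := by
        simp [pvStepPair, himp]
      rw [hstep]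
      set s := c.1 with hs_def
      set v := c.2 with hv_def
      -- the improved state is not yet expanded
      have hsopen : s ∉ visited := by
        intro hmem
        have hsome := hS s hmem
        obtain ⟨w, hw⟩ := Option.isSome_iff_exists.1 hsome
        have hwt := hvist s hmem w hw
        unfold pvImprove at himp
        rw [hw] at himp
        simp only [decide_eq_true_eq] at himp
        omega
      -- the new entry is not already in the queue
      have hfresh : (v, s) ∉ q := by
        intro hmem
        obtain ⟨v', hv', hle, _⟩ := hA (v, s) hmem
        unfold pvImprove at himp
        rw [hv'] at himp
        simp only [decide_eq_true_eq] at himp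
        simp only at hle
        omega
      have hget' := fun s' => PySem.Dict.get?_insert dist s s' v
      have hsize' := PySem.Dict.size_insert dist s v
      have hND' : (dist.insert s v).keys.Nodup := PySem.Dict.nodup_keys_insert dist s v hND
      have hsize_mono : dist.size ≤ (dist.insert s v).size := by
        rw [hsize']; split <;> omega
      have hbnd_mono : 7 * ((dist.size : Int) - 1) ≤ 7 * (((dist.insert s v).size : Int) - 1) := by
        have : (dist.size : Int) ≤ ((dist.insert s v).size : Int) := by exact_mod_cast hsize_mono
        omega
      -- value stored is nonnegative
      have hv0 : 0 ≤ v := by omega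
      -- bound for the inserted value
      have hv_bnd : v ≤ 7 * (((dist.insert s v).size : Int) - 1) := by
        by_cases hc : dist.contains s = true
        · have hsome : (dist.get? s).isSome = true := by
            rw [← PySem.Dict.contains_eq_isSome_get?]; exact hc
          obtain ⟨w, hw⟩ := Option.isSome_iff_exists.1 hsome
          unfold pvImprove at himp
          rw [hw] at himp
          simp only [decide_eq_true_eq] at himp
          have := (hBnd s w hw).2
          have := hbnd_mono
          omega
        · have hcf : dist.contains s = false := by simpa using hc
          rw [hsize', hcf] at *
          simp only [Bool.false_eq_true, if_false]
          have : ((dist.size + 1 : Nat) : Int) = (dist.size : Int) + 1 := by push_cast; ring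
          rw [this]
          omega
      refine ?_
      have hinv' : pvInv W H (dist.insert s v) visited (pvHeapPush q (v, s)) := by
        refine ⟨hND', hVN, ?_, ?_, ?_, ?_, ?_, ?_, ?_, ?_⟩
        · exact pairwise_pvHeapPush q (v, s) hPW hfresh
        · -- entries dominate dict values
          intro e he
          rcases (mem_pvHeapPush q (v, s) e).1 he with he' | rfl
          · obtain ⟨v', hv', hle, himpl⟩ := hA e he'
            by_cases hes : e.2 = s
            · obtain ⟨w, hw⟩ : ∃ w, dist.get? s = some w := ⟨v', hes ▸ hv'⟩
              unfold pvImprove at himp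
              rw [hw] at himp
              simp only [decide_eq_true_eq] at himp
              have hv'w : v' = w := by rw [hes] at hv'; rw [hv'] at hw; exact Option.some_inj.1 hw
              refine ⟨v, ?_, ?_, ?_⟩
              · rw [hget' e.2, if_pos hes]
              · omega
              · intro hveq; omega
            · exact ⟨v', by rw [hget' e.2, if_neg hes]; exact hv', hle, himpl⟩
          · exact ⟨v, by simp [hget' s], le_refl v, fun _ => hsopen⟩
        · -- fresh entries of open states are queued
          intro s' v' hv' hs'
          by_cases hes : s' = s
          · rw [hget' s', if_pos hes] at hv'
            have hvv : v' = v := Option.some_inj.1 hv'.symm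
            rw [hvv, hes]
            exact (mem_pvHeapPush q (v, s) (v, s)).2 (Or.inr rfl)
          · rw [hget' s', if_neg hes] at hv'
            exact (mem_pvHeapPush q (v, s) (v', s')).2 (Or.inl (hB s' v' hv' hs'))
        · -- expanded states dominate every queue entry
          intro s' hs' v' hv' e he
          have hes : s' ≠ s := fun h => hsopen (h ▸ hs')
          rw [hget' s', if_neg hes] at hv'
          rcases (mem_pvHeapPush q (v, s) e).1 he with he' | rfl
          · exact hC s' hs' v' hv' e he'
          · have := hvist s' hs' v' hv'
            simp only
            omega
        · -- expanded states stay keys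
          intro s' hs'
          have hes : s' ≠ s := fun h => hsopen (h ▸ hs')
          rw [hget' s', if_neg hes]
          exact hS s' hs'
        · -- keys are valid states
          intro s' v' hv'
          by_cases hes : s' = s
          · exact hes ▸ hc_val
          · rw [hget' s', if_neg hes] at hv'
            exact hVal s' v' hv'
        · -- values are nonnegative and bounded
          intro s' v' hv'
          by_cases hes : s' = s
          · rw [hes, hget' s, if_pos rfl] at hv'
            have : v' = v := by simpa using hv'.symm
            subst this
            exact ⟨hv0, hv_bnd⟩
          · rw [hget' s', if_neg hes] at hv'
            have := hBnd s' v' hv'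
            constructor
            · exact this.1
            · have := this.2
              omega
        · -- queue times are nonnegative
          intro e he
          rcases (mem_pvHeapPush q (v, s) e).1 he with he' | rfl
          · exact hQ0 e he'
          · simpa using hv0
      have hvist' : ∀ s' ∈ visited, ∀ v', (dist.insert s v).get? s' = some v' → v' ≤ t := by
        intro s' hs' v' hv'
        have hes : s' ≠ s := fun h => hsopen (h ▸ hs')
        rw [hget' s', if_neg hes] at hv'
        exact hvist s' hs' v' hv'
      have htb' : t ≤ 7 * (((dist.insert s v).size : Int) - 1) := le_trans htb hbnd_mono
      have hphi : pvPhi W H (dist.insert s v) (pvHeapPush q (v, s)) ≤ pvPhi W H dist q := by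
        apply pvPhi_push_le W H dist q s v hND hv0
        · intro hcf
          constructor
          · -- a new key fits in the grid: size < 3*W*H
            have hkeys' : (dist.insert s v).keys.Nodup := hND'
            have hvalid' : ∀ k ∈ (dist.insert s v).keys, pvValid W H k := by
              apply pvKeysValid
              intro s' v' hv'
              by_cases hes : s' = s
              · exact hes ▸ hc_val
              · rw [hget' s', if_neg hes] at hv'
                exact hVal s' v' hv'
            have hcard := pvCard W H (dist.insert s v).keys hkeys' hvalid'
            rw [← pvSize_eq_keys_length] at hcard
            rw [hsize', hcf] at hcard
            simp only [Bool.false_eq_true, if_false] at hcard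
            omega
          · -- and its value is bounded by 7 * size
            omega
        · intro w hw
          unfold pvImprove at himp
          rw [hw] at himp
          simpa using himp
      obtain ⟨ih1, ih2, ih3, ih4⟩ := ih hcs_val hcs_lo hcs_hi (dist.insert s v)
        (pvHeapPush q (v, s)) hinv' hvist' ht0 htb'
      exact ⟨ih1, ih2, le_trans hsize_mono ih3, le_trans ih4 hphi⟩
lemma pvBisim (cave : List (List Int)) (target : Int × Int) (W H : Nat)
    (hW : ((PySem.List.pyGetD cave 0 []).length : Int) = (W : Int)) (hH : (cave.length : Int) = (H : Int)) :
    ∀ (fa fb : Nat) (dist : PySem.Dict PvState Int) (visited : PySem.Set PvState)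
      (q : List PvEntry),
    pvInv W H dist visited q →
    pvPhi W H dist q < fa →
    3 * W * H + 1 - visited.length < fb →
    pvLoopA cave target fa dist q =
      pvLoopB cave target ((PySem.List.pyGetD cave 0 []).length : Int) ((cave.length : Int)) fb dist visited := by
  intro fa
  induction fa with
  | zero => intro fb dist visited q _ hfa _; omega
  | succ n ih =>
    intro fb dist visited q hinv hfa hfb
    obtain ⟨hND, hVN, hPW, hA, hB, hC, hS, hVal, hBnd, hQ0⟩ := hinv
    cases fb with
    | zero => omega
    | succ m =>
    -- visited states are valid keys, so |visited| ≤ 3*W*H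
    have hvis_val : ∀ s ∈ visited, pvValid W H s := by
      intro s hs
      obtain ⟨w, hw⟩ := Option.isSome_iff_exists.1 (hS s hs)
      exact hVal s w hw
    have hvis_card : visited.length ≤ 3 * W * H := pvCard W H visited hVN hvis_val
    cases q with
    | nil =>
      -- A's queue is empty: no state is open, B's scan finds nothing; both return none
      have hscan : pvScanBest dist visited = none := by
        apply pvScanBest_eq_none
        intro p hp
        have hpv : dist.get? p.1 = some p.2 := PySem.Dict.get?_of_mem_items dist hp hND
        by_cases hmem : p.1 ∈ visited
        · simpa using hmem
        · exact absurd (hB p.1 p.2 hpv hmem) (List.not_mem_nil)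
      simp only [pvLoopA, pvLoopB, hscan]
    | cons head rest =>
      obtain ⟨t, pos, eq⟩ := head
      obtain ⟨v0, hv0get, hv0le, hv0impl⟩ := hA (t, pos, eq) (by simp)
      have hgetD : dist.getD (pos, eq) 0 = v0 :=
        PySem.Dict.getD_of_get?_eq_some dist 0 hv0get
      by_cases hstale : dist.getD (pos, eq) 0 < t
      · -- stale entry: A skips it, B does not move
        have hinv' : pvInv W H dist visited rest := by
          refine ⟨hND, hVN, (List.pairwise_cons.1 hPW).2, ?_, ?_, ?_, hS, hVal, hBnd, ?_⟩
          · exact fun e he => hA e (by simp [he])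
          · intro s' v' hv' hs'
            rcases List.mem_cons.1 (hB s' v' hv' hs') with heq | hmem
            · exfalso
              have h1 : v' = t ∧ s' = (pos, eq) := by
                constructor
                · exact congrArg Prod.fst heq
                · exact congrArg Prod.snd heq
              obtain ⟨rfl, rfl⟩ := h1
              rw [hv'] at hv0get
              have : v0 = v' := by simpa using hv0get.symm
              omega
            · exact hmem
          · exact fun s' hs' v' hv' e he => hC s' hs' v' hv' e (by simp [he])
          · exact fun e he => hQ0 e (by simp [he])
        have hphi' : pvPhi W H dist rest < n := by
          unfold pvPhi at hfa ⊢
          simp only [List.length_cons] at hfa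
          omega
        have hrec := ih (m + 1) dist visited rest hinv' hphi' hfb
        simp only [pvLoopA, hstale, if_true]
        exact hrec
      · -- fresh entry: its time equals the dict value and B's scan selects exactly it
        obtain rfl : v0 = t := by omega
        have hs0vis : (pos, eq) ∉ visited := hv0impl rfl
        have hrest_lt : ∀ e ∈ rest, pvLtP (v0, pos, eq) e := (List.pairwise_cons.1 hPW).1
        have hscan : pvScanBest dist visited = some (v0, (pos, eq)) := by
          apply pvScanBest_eq_some dist visited (pos, eq) v0 hND
            (PySem.Dict.mem_items_of_get?_eq_some dist hv0get)
            (by simpa using hs0vis)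
          intro p hp hpvis hpne
          have hpv : dist.get? p.1 = some p.2 := PySem.Dict.get?_of_mem_items dist hp hND
          have hpopen : p.1 ∉ visited := by simpa using hpvis
          rcases List.mem_cons.1 (hB p.1 p.2 hpv hpopen) with heq | hmem
          · exfalso
            exact hpne (congrArg Prod.snd heq)
          · exact hrest_lt (p.2, p.1) hmem
        by_cases hgoal : (pos, eq) = (target, 1)
        · -- both return the popped time
          simp only [pvLoopA, pvLoopB, hscan]
          rw [if_neg hstale, if_pos hgoal, if_pos hgoal]
        · -- expansion step
          simp only [pvLoopA, pvLoopB, hscan]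
          rw [if_neg hstale, if_neg hgoal, if_neg hgoal]
          -- names for the candidate lists
          have hgn : get_neighbours cave pos eq =
              [(pos.1 - 1, pos.2), (pos.1 + 1, pos.2), (pos.1, pos.2 - 1),
                (pos.1, pos.2 + 1)].filter
                (fun p => decide (p.1 < ((PySem.List.pyGetD cave 0 []).length : Int)) &&
                  decide (0 ≤ p.1) && decide (p.2 < (cave.length : Int)) && decide (0 ≤ p.2) &&
                  (pvCaveAt cave p.1 p.2 != eq)) := rfl
          have hfEq : ([(pos.1 - 1, pos.2), (pos.1 + 1, pos.2), (pos.1, pos.2 - 1),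
                (pos.1, pos.2 + 1)].filter
                (fun p => decide (0 ≤ p.1) &&
                  decide (p.1 < ((PySem.List.pyGetD cave 0 []).length : Int)) &&
                  decide (0 ≤ p.2) && decide (p.2 < (cave.length : Int)) &&
                  (pvCaveAt cave p.1 p.2 != eq)))
              = get_neighbours cave pos eq := by
            rw [hgn]
            exact List.filter_congr (fun p _ =>
              pvPred_eq ((PySem.List.pyGetD cave 0 []).length : Int) (cave.length : Int) cave eq p)
          -- rewrite A's two folds into pvRelax form
          rw [pvFoldA_moves (get_neighbours cave pos eq) eq v0 (dist, rest)]
          rw [pvFoldA_switch ([0, 1, 2] : List Int) cave pos v0]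
          rw [← pvRelax_append]
          -- rewrite B's fold into pvRelax form and align the candidate list
          rw [pvFoldB_eq _ dist rest]
          simp only [List.map_map]
          rw [hfEq]
          rw [PySem.Set.add_of_not_mem hs0vis]
          -- invariant for the expanded state
          have hposval := hVal (pos, eq) v0 hv0get
          have hv00 : 0 ≤ v0 := (hBnd (pos, eq) v0 hv0get).1
          have htbv : v0 ≤ 7 * ((dist.size : Int) - 1) := (hBnd (pos, eq) v0 hv0get).2
          set cs1 := (get_neighbours cave pos eq).map (fun np => ((np, eq), v0 + 1)) with hcs1
          set cs2 := ((([0, 1, 2] : List Int).filter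
              (fun ne => pvCaveAt cave pos.1 pos.2 != ne)).map
              (fun ne => ((pos, ne), v0 + 7))) with hcs2
          have hpv : 0 ≤ pos.1 ∧ pos.1 < (W : Int) ∧ 0 ≤ pos.2 ∧ pos.2 < (H : Int) ∧
              0 ≤ eq ∧ eq < 3 := by simpa [pvValid] using hposval
          have hval_cs : ∀ c ∈ cs1 ++ cs2, pvValid W H c.1 := by
            intro c hc
            rcases List.mem_append.1 hc with hc | hc
            · obtain ⟨np, hnp, rfl⟩ := List.mem_map.1 hc
              rw [hgn] at hnp
              obtain ⟨-, hpred⟩ := List.mem_filter.1 hnp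
              simp only [Bool.and_eq_true, decide_eq_true_eq, bne_iff_ne] at hpred
              obtain ⟨⟨⟨⟨hp1, hp2⟩, hp3⟩, hp4⟩, -⟩ := hpred
              show 0 ≤ np.1 ∧ np.1 < (W : Int) ∧ 0 ≤ np.2 ∧ np.2 < (H : Int) ∧ 0 ≤ eq ∧ eq < 3
              omega
            · obtain ⟨ne, hne, rfl⟩ := List.mem_map.1 hc
              obtain ⟨hne1, -⟩ := List.mem_filter.1 hne
              have hne3 : ne = 0 ∨ ne = 1 ∨ ne = 2 := by simpa using hne1
              show 0 ≤ pos.1 ∧ pos.1 < (W : Int) ∧ 0 ≤ pos.2 ∧ pos.2 < (H : Int) ∧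
                0 ≤ ne ∧ ne < 3
              omega
          have hlo_cs : ∀ c ∈ cs1 ++ cs2, v0 + 1 ≤ c.2 := by
            intro c hc
            rcases List.mem_append.1 hc with hc | hc
            · obtain ⟨np, _, rfl⟩ := List.mem_map.1 hc; omega
            · obtain ⟨ne, _, rfl⟩ := List.mem_map.1 hc; omega
          have hhi_cs : ∀ c ∈ cs1 ++ cs2, c.2 ≤ v0 + 7 := by
            intro c hc
            rcases List.mem_append.1 hc with hc | hc
            · obtain ⟨np, _, rfl⟩ := List.mem_map.1 hc; omega
            · obtain ⟨ne, _, rfl⟩ := List.mem_map.1 hc; omega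
          have hVN' : (visited ++ [(pos, eq)]).Nodup := by
            rw [List.nodup_append]
            refine ⟨hVN, List.nodup_singleton _, ?_⟩
            intro a ha b hb
            simp only [List.mem_singleton] at hb
            subst hb
            exact fun h => hs0vis (h ▸ ha)
          have hmemvis' : ∀ s' : PvState, s' ∈ visited ++ [(pos, eq)] ↔
              s' ∈ visited ∨ s' = (pos, eq) := by
            intro s'; simp
          have hinv_mid : pvInv W H dist (visited ++ [(pos, eq)]) rest := by
            refine ⟨hND, hVN', (List.pairwise_cons.1 hPW).2, ?_, ?_, ?_, ?_, hVal, hBnd, ?_⟩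
            · intro e he
              obtain ⟨v', hv', hle, himpl⟩ := hA e (by simp [he])
              refine ⟨v', hv', hle, ?_⟩
              intro hveq hmem'
              rcases (hmemvis' e.2).1 hmem' with hmem' | hmem'
              · exact himpl hveq hmem'
              · have hv'0 : v' = v0 := by
                  rw [hmem'] at hv'
                  rw [hv'] at hv0get
                  exact Option.some_inj.1 hv0get
                have heq : e = (v0, pos, eq) := by
                  have : e = (e.1, e.2) := rfl
                  rw [this, hmem', ← hveq, hv'0]
                have := hrest_lt e he
                rw [heq] at this
                unfold pvLtP at this
                rw [pvEntryLt_irrefl] at this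
                cases this
            · intro s' v' hv' hs'
              have hs'v : s' ∉ visited := fun h => hs' ((hmemvis' s').2 (Or.inl h))
              have hs'ne : s' ≠ (pos, eq) := fun h => hs' ((hmemvis' s').2 (Or.inr h))
              rcases List.mem_cons.1 (hB s' v' hv' hs'v) with heq | hmem
              · exact absurd (congrArg Prod.snd heq) hs'ne
              · exact hmem
            · intro s' hs' v' hv' e he
              rcases (hmemvis' s').1 hs' with hs' | hs'
              · exact hC s' hs' v' hv' e (by simp [he])
              · have hv'0 : v' = v0 := by
                  rw [hs'] at hv'
                  rw [hv'] at hv0get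
                  exact Option.some_inj.1 hv0get
                rw [hv'0]
                exact pvEntryLt_fst_le _ _ (hrest_lt e he)
            · intro s' hs'
              rcases (hmemvis' s').1 hs' with hs' | hs'
              · exact hS s' hs'
              · rw [hs', hv0get]; rfl
            · exact fun e he => hQ0 e (by simp [he])
          have hvist_mid : ∀ s' ∈ visited ++ [(pos, eq)], ∀ v',
              dist.get? s' = some v' → v' ≤ v0 := by
            intro s' hs' v' hv'
            rcases (hmemvis' s').1 hs' with hs' | hs'
            · exact hC s' hs' v' hv' (v0, pos, eq) (by simp)
            · rw [hs'] at hv'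
              rw [hv'] at hv0get
              have : v' = v0 := Option.some_inj.1 hv0get
              omega
          obtain ⟨hinvP, hvistP, hsizeP, hphiP⟩ :=
            pvRelax_preserve W H (visited ++ [(pos, eq)]) v0 (cs1 ++ cs2) hval_cs hlo_cs hhi_cs
              dist rest hinv_mid hvist_mid hv00 htbv
          have hphi_step : pvPhi W H dist ((v0, pos, eq) :: rest) = pvPhi W H dist rest + 1 := by
            unfold pvPhi
            simp only [List.length_cons]
            omega
          have hphi2 : pvPhi W H (pvRelax (cs1 ++ cs2) (dist, rest)).1
              (pvRelax (cs1 ++ cs2) (dist, rest)).2 < n := by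
            omega
          have hfb2 : 3 * W * H + 1 - (visited ++ [(pos, eq)]).length < m := by
            simp only [List.length_append, List.length_singleton]
            omega
          exact ih m (pvRelax (cs1 ++ cs2) (dist, rest)).1 (visited ++ [(pos, eq)])
            (pvRelax (cs1 ++ cs2) (dist, rest)).2 hinvP hphi2 hfb2
-- the initial state satisfies the invariant
lemma pvInit_inv (W H : Nat) (hW1 : 1 ≤ W) (hH1 : 1 ≤ H) :
    pvInv W H (PySem.Dict.empty.insert ((0, 0), 1) 0) PySem.Set.empty
      [(0, ((0, 0), 1))] := by
  have hget : ∀ s : PvState, (PySem.Dict.empty.insert ((0, 0), 1) (0 : Int)).get? s =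
      if s = ((0, 0), 1) then some 0 else none := by
    intro s
    rw [PySem.Dict.get?_insert]
    by_cases hs : s = ((0, 0), 1) <;> simp [hs, PySem.Dict.get?_empty]
  have hsize : (PySem.Dict.empty.insert (((0 : Int), (0 : Int)), (1 : Int)) (0 : Int)).size = 1 := by
    decide
  refine ⟨?_, ?_, ?_, ?_, ?_, ?_, ?_, ?_, ?_, ?_⟩
  · exact PySem.Dict.nodup_keys_insert _ _ _ PySem.Dict.nodup_keys_empty
  · exact List.nodup_nil
  · simp
  · intro e he
    simp only [List.mem_singleton] at he
    subst he
    refine ⟨0, ?_, le_refl _, fun _ => List.not_mem_nil⟩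
    rw [hget]
    simp
  · intro s v hv hs
    rw [hget] at hv
    by_cases hs' : s = ((0, 0), 1)
    · rw [if_pos hs'] at hv
      have : v = 0 := by simpa using hv.symm
      simp [hs', this]
    · rw [if_neg hs'] at hv
      cases hv
  · intro s hs
    cases hs
  · intro s hs
    cases hs
  · intro s v hv
    rw [hget] at hv
    by_cases hs' : s = ((0, 0), 1)
    · subst hs'
      refine ⟨by norm_num, ?_, by norm_num, ?_, by norm_num, by norm_num⟩
      -- 0 < W and 0 < H
      · show (0 : Int) < (W : Int)
        exact_mod_cast hW1
      · show (0 : Int) < (H : Int)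
        exact_mod_cast hH1
    · rw [if_neg hs'] at hv
      cases hv
  · intro s v hv
    rw [hget] at hv
    by_cases hs' : s = ((0, 0), 1)
    · rw [if_pos hs'] at hv
      have : v = 0 := by simpa using hv.symm
      rw [hsize, this]
      norm_num
    · rw [if_neg hs'] at hv
      cases hv
  · intro e he
    simp only [List.mem_singleton] at he
    subst he
    simp

-- ===== VERDICT (by name: the statement is the Claim_ definition above) =====
theorem fastest_path_time_spec : Claim_equal_fastest_path_time := by
  unfold Claim_equal_fastest_path_time
  intro cave target _hdom hpre
  unfold Spec_fastest_path_time
  obtain ⟨hne, hrow, -⟩ := hpre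
  unfold fastest_path_time fastest_path_time_alt
  have hW1 : 1 ≤ (PySem.List.pyGetD cave 0 []).length := List.length_pos_iff.2 hrow
  have hH1 : 1 ≤ cave.length := List.length_pos_iff.2 hne
  set W := (PySem.List.pyGetD cave 0 []).length with hWdef
  set H := cave.length with hHdef
  have hsize : (PySem.Dict.empty.insert (((0 : Int), (0 : Int)), (1 : Int)) (0 : Int)).size = 1 := by
    decide
  have hphi0 : pvPhi W H (PySem.Dict.empty.insert ((0, 0), 1) 0) [(0, ((0, 0), 1))] <
      3 * W * H * (21 * W * H + 1) + 2 := by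
    unfold pvPhi
    rw [hsize]
    have hitems : (PySem.Dict.empty.insert (((0 : Int), (0 : Int)), (1 : Int)) (0 : Int)).items =
        [((((0 : Int), (0 : Int)), (1 : Int)), (0 : Int))] := by decide
    rw [hitems]
    have hN : 3 ≤ 3 * W * H := by
      calc (3 : Nat) = 3 * 1 * 1 := by norm_num
      _ ≤ 3 * W * H := by exact Nat.mul_le_mul (Nat.mul_le_mul_left 3 hW1) hH1
    have hsplit : 3 * W * H * (21 * W * H + 1) =
        (3 * W * H - 1) * (21 * W * H + 1) + (21 * W * H + 1) := by
      have h1 : 3 * W * H = (3 * W * H - 1) + 1 := by omega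
      calc 3 * W * H * (21 * W * H + 1) = ((3 * W * H - 1) + 1) * (21 * W * H + 1) := by
            rw [← h1]
      _ = (3 * W * H - 1) * (21 * W * H + 1) + (21 * W * H + 1) := by
            rw [Nat.add_mul, Nat.one_mul]
    simp only [List.map_cons, List.map_nil, List.sum_cons, List.sum_nil, List.length_cons,
      List.length_nil]
    rw [hsplit]
    omega
  have hfb0 : 3 * W * H + 1 - (PySem.Set.empty : PySem.Set PvState).length <
      3 * W * H + 2 := by
    simp [PySem.Set.empty]
  exact pvBisim cave target W H rfl rfl (3 * W * H * (21 * W * H + 1) + 2) (3 * W * H + 2)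
    (PySem.Dict.empty.insert ((0, 0), 1) 0) PySem.Set.empty [(0, ((0, 0), 1))]
    (pvInit_inv W H hW1 hH1) hphi0 hfb0
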